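-- pv_equiv track=rewrite | github.com/Ne-Se-Chete/CableUndefined-Embedded | Cable Undefined V3/SignalAnalyzerSerial.py | decode_adc_frame
-- ===== SOURCE A (Python) =====
-- def count_bits(n):
--     return bin(n).count('1')
--
-- def decode_adc_frame(data):
--     channel_map = data[1]
--     num_channels = count_bits(channel_map)
--     expected_size = 1 + 1 + (num_channels * 2) + 2
--     if len(data) < expected_size:
--         return None
--     adc_vals = []
--     index = 2
--     for i in range(8):
--         if (channel_map >> i) & 0x01:
--             raw = int.from_bytes(data[index:index+2], 'big')
--             adc_vals.append((i, raw))
--             index += 2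
--     timestamp = int.from_bytes(data[index:index+2], 'big')
--     return adc_vals, timestamp, expected_size
-- ===== SOURCE B (Python) =====
-- def decode_adc_frame(data):
--     channel_map = data[1]
--
--     def walk(i, rest):
--         # recursive stream consumption: failure (frame too short) propagates as None
--         if i == 8:
--             if len(rest) < 2:
--                 return None
--             return [], rest[0] * 256 + rest[1]
--         if (channel_map >> i) & 0x01:
--             if len(rest) < 2:
--                 return None
--             r = walk(i + 1, rest[2:])
--             if r is None:
--                 return None
--             vals, ts = r
--             return [(i, rest[0] * 256 + rest[1])] + vals, ts
--         return walk(i + 1, rest)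
--
--     r = walk(0, data[2:])
--     if r is None:
--         return None
--     vals, ts = r
--     return vals, ts, 2 + 2 * len(vals) + 2
-- ===== Notes on version B (the rewrite author's own statement) =====
-- stated objective: alternative
-- what changed: A precomputes a popcount-based expected size, checks it upfront, then runs a cursor loop slicing the buffer; B never computes a bit count or a size guard: it consumes the byte stream by structural recursion over the 8 bit positions, propagating None when the stream runs short, and derives expected_size afterwards from the number of decoded pairs.
-- outside the precondition, e.g. on decode_adc_frame([0, 256, 9, 9, 9, 9]): A returns ([], 2313, 6), B returns ([], 2313, 4)
import Mathlib
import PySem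

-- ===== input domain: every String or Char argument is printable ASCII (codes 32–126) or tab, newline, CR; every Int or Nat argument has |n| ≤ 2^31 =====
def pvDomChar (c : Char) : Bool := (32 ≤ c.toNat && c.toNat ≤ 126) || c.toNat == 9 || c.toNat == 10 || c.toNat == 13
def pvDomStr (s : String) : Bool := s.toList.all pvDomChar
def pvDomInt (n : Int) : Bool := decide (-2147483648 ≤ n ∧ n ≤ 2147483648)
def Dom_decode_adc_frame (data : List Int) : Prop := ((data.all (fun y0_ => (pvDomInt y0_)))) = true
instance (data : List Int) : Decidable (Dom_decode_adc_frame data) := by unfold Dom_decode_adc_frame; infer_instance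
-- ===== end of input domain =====

-- B replaces A's upfront popcount size check + cursor loop by a single structural recursion
-- over the 8 bit positions that consumes the byte stream and propagates None when it runs
-- short; equivalence is about the RETURN value (neither version mutates its input).

-- ===== PORT A =====
-- count_bits(n) = bin(n).count('1') = popcount of |n| = PySem.Int.bitCount (Python-exact)
def pv_count_bits (n : Int) : Int := (PySem.Int.bitCount n : Int)

-- int.from_bytes(bs, 'big') for byte lists (Pre_ keeps every element in 0..255, where this is exact)
def pvFromBytes (bs : List Int) : Int := bs.foldl (fun acc b => acc * 256 + b) 0

-- the truth test `(channel_map >> i) & 0x01` (i ∈ range(8), so i ≥ 0)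
def pvBit (cm i : Int) : Bool := PySem.Int.band (cm >>> i.toNat) 1 == 1

def decode_adc_frame (data : List Int) : Option ((List (Int × Int)) × Int × Int) :=
  match PySem.List.pyGet? data 1 with
  | none => none                                   -- IndexError (outside Pre_)
  | some channel_map =>
    let num_channels := pv_count_bits channel_map
    let expected_size := 1 + 1 + (num_channels * 2) + 2
    if (data.length : Int) < expected_size then none
    else
      let s := (PySem.List.pyRange 0 8 1).foldl
        (fun (s : List (Int × Int) × Int) i =>
          if pvBit channel_map i then
            (s.1 ++ [(i, pvFromBytes (PySem.List.slice data (some s.2) (some (s.2 + 2))))], s.2 + 2)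
          else s)
        ([], 2)
      let timestamp := pvFromBytes (PySem.List.slice data (some s.2) (some (s.2 + 2)))
      some (s.1, timestamp, expected_size)

-- ===== PORT B =====
-- walk(i, rest) of Source B; i only takes values 0..8, so Python's `i == 8` stop test is written
-- as `8 ≤ i` to make the recursion on 8 - i visibly terminating (same branch on every call).
def pvWalk (cm : Int) (i : Nat) (rest : List Int) : Option ((List (Int × Int)) × Int) :=
  if 8 ≤ i then
    if rest.length < 2 then none
    else some ([], rest.getD 0 0 * 256 + rest.getD 1 0)
  else if pvBit cm (i : Int) then
    if rest.length < 2 then none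
    else
      match pvWalk cm (i + 1) (PySem.List.slice rest (some 2) none) with
      | none => none
      | some (vals, ts) => some (((i : Int), rest.getD 0 0 * 256 + rest.getD 1 0) :: vals, ts)
  else pvWalk cm (i + 1) rest
termination_by 8 - i
decreasing_by all_goals omega

def decode_adc_frame_alt (data : List Int) : Option ((List (Int × Int)) × Int × Int) :=
  match PySem.List.pyGet? data 1 with
  | none => none                                   -- IndexError (outside Pre_)
  | some channel_map =>
    match pvWalk channel_map 0 (PySem.List.slice data (some 2) none) with
    | none => none
    | some (vals, ts) => some (vals, ts, 2 + 2 * (vals.length : Int) + 2)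

-- ===== PRECONDITION & SPEC =====
-- number of set bits of the channel map that the decoding loop actually visits (bits 0..7)
def pvLowCount (cm : Int) : Nat := ((PySem.List.pyRange 0 8 1).filter (pvBit cm)).length

-- Pre_ admits frames with a header (length ≥ 2) that are either too short for any channel payload
-- (both programs answer None) or carry a byte channel map with byte values in the decoded region.
-- Excluded: short inputs where A raises (IndexError/ValueError from int.from_bytes on non-byte
-- elements), and inputs whose channel map falls outside 0..255, where A's size and offset
-- accounting (bin() popcount of |n| vs. sign-extended shifts over bits 0..7 only) is an accident
-- of its implementation; claim.json cites excluded inputs where A still returns.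
def Pre_decode_adc_frame (data : List Int) : Prop :=
  2 ≤ data.length ∧
    ((0 ≤ data.getD 1 0 ∧ data.getD 1 0 < 256 ∧
        ∀ x ∈ data.take (4 + 2 * pvLowCount (data.getD 1 0)), 0 ≤ x ∧ x < 256) ∨
      ((data.length : Int) <
        4 + 2 * min (PySem.Int.bitCount (data.getD 1 0)) (pvLowCount (data.getD 1 0))))
instance (data : List Int) : Decidable (Pre_decode_adc_frame data) := by
  unfold Pre_decode_adc_frame; infer_instance

def pvWitness_decode_adc_frame : List Int := [0, 5, 1, 2, 3, 4, 5, 6]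

def Spec_decode_adc_frame (data : List Int) (out : Option ((List (Int × Int)) × Int × Int)) : Prop := out = decode_adc_frame_alt data
instance (data : List Int) (out : Option ((List (Int × Int)) × Int × Int)) : Decidable (Spec_decode_adc_frame data out) := by unfold Spec_decode_adc_frame; infer_instance

-- ===== CLAIM (what is proved, stated in full; the proofs are below) =====
def Claim_equal_decode_adc_frame : Prop := ∀ (data : List Int), Dom_decode_adc_frame data → Pre_decode_adc_frame data → Spec_decode_adc_frame data (decode_adc_frame data)

-- ===== LEMMAS AND PROOFS =====

-- the common shape of the decoded (channel, word) list: channels `act` read at offsets idx, idx+2, …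
def pvGo (data : List Int) (act : List Int) (idx : Int) : List (Int × Int) :=
  match act with
  | [] => []
  | i :: t => (i, pvFromBytes (PySem.List.slice data (some idx) (some (idx + 2)))) :: pvGo data t (idx + 2)

-- B's pair list: channels `act` paired with the 2-byte words consumed from the head of `rest`
def pvPairs (rest : List Int) (act : List Nat) : List (Int × Int) :=
  match act with
  | [] => []
  | j :: t => ((j : Int), rest.getD 0 0 * 256 + rest.getD 1 0) :: pvPairs (rest.drop 2) t

lemma pvPairs_length (rest : List Int) (act : List Nat) : (pvPairs rest act).length = act.length := by
  induction act generalizing rest with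
  | nil => rfl
  | cons j t ih => simp [pvPairs, ih]

lemma pvLoopA (data : List Int) (cm : Int) (l : List Int) (acc : List (Int × Int)) (idx : Int) :
    l.foldl
      (fun (s : List (Int × Int) × Int) i =>
        if pvBit cm i then
          (s.1 ++ [(i, pvFromBytes (PySem.List.slice data (some s.2) (some (s.2 + 2))))], s.2 + 2)
        else s)
      (acc, idx)
    = (acc ++ pvGo data (l.filter (pvBit cm)) idx,
       idx + 2 * (l.filter (pvBit cm)).length) := by
  induction l generalizing acc idx with
  | nil => simp [pvGo]
  | cons i t ih =>
    by_cases h : pvBit cm i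
    · rw [List.foldl_cons, if_pos h, ih, List.filter_cons_of_pos h]
      refine Prod.ext ?_ ?_
      · simp [pvGo]
      · simp only [List.length_cons]
        push_cast
        ring
    · rw [List.foldl_cons, if_neg h, ih, List.filter_cons_of_neg h]

lemma pvFb_two (data : List Int) (j : Nat) (h : j + 2 ≤ data.length) :
    pvFromBytes (PySem.List.slice data (some (j : Int)) (some ((j : Int) + 2))) =
      data.getD j 0 * 256 + data.getD (j + 1) 0 := by
  have h2 : PySem.List.slice data (some (j : Int)) (some ((j : Int) + 2)) = (data.drop j).take 2 := by
    have := PySem.List.slice_natCast_add data j 2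
    simpa using this
  rw [h2]
  have hlen : 2 ≤ (data.drop j).length := by simp; omega
  match hm : data.drop j with
  | [] => simp [hm] at hlen
  | [a] => simp [hm] at hlen
  | a :: b :: t =>
    have ha : data[j]? = some a := by
      have h0 : (data.drop j)[0]? = some a := by rw [hm]; rfl
      rw [List.getElem?_drop] at h0; simpa using h0
    have hb : data[j + 1]? = some b := by
      have h0 : (data.drop j)[1]? = some b := by rw [hm]; rfl
      rw [List.getElem?_drop] at h0; simpa using h0
    simp [pvFromBytes, List.getD, ha, hb]

lemma pvRange8 : PySem.List.pyRange 0 8 1 = [0, 1, 2, 3, 4, 5, 6, 7] := by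
  rw [PySem.List.pyRange_one]; norm_num; decide

-- for a byte channel map, bin(cm).count('1') counts exactly the set bits among 0..7
set_option maxHeartbeats 1000000 in
set_option maxRecDepth 10000 in
lemma pvCount_eq (cm : Int) (h0 : 0 ≤ cm) (h1 : cm < 256) :
    pv_count_bits cm = (((PySem.List.pyRange 0 8 1).filter (fun i => pvBit cm i)).length : Int) := by
  have key : ∀ m : Fin 256,
      (PySem.Int.bitCount (m.val : Int) : Int) =
        ((([0, 1, 2, 3, 4, 5, 6, 7] : List Int).filter (fun i => pvBit (m.val : Int) i)).length : Int) := by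
    decide
  have hm : cm = ((⟨cm.toNat, by omega⟩ : Fin 256).val : Int) := by simp; omega
  rw [pvRange8, pv_count_bits, hm]
  exact key _

lemma pvGetD_drop (l : List Int) (m k : Nat) : (l.drop m).getD k 0 = l.getD (m + k) 0 := by
  simp [List.getD, List.getElem?_drop]

-- characterization of B's walk: it decodes the set bits of cm among i..7 and fails exactly
-- when the stream is shorter than the payload-plus-timestamp it needs
lemma pvWalk_eq (cm : Int) : ∀ (n i : Nat), i + n = 8 → ∀ (rest : List Int),
    pvWalk cm i rest =
      (let act := (List.range' i n).filter (fun j : Nat => pvBit cm (j : Int))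
       if rest.length < 2 * act.length + 2 then none
       else some (pvPairs rest act,
         rest.getD (2 * act.length) 0 * 256 + rest.getD (2 * act.length + 1) 0)) := by
  intro n
  induction n with
  | zero =>
    intro i hi rest
    have h8 : i = 8 := by omega
    subst h8
    rw [pvWalk]
    simp [pvPairs]
  | succ n ih =>
    intro i hi rest
    have hlt : ¬ 8 ≤ i := by omega
    rw [pvWalk, if_neg hlt]
    by_cases hb : pvBit cm (i : Int)
    · have hcons : (List.range' i (n + 1)).filter (fun j : Nat => pvBit cm (j : Int))
          = i :: (List.range' (i + 1) n).filter (fun j : Nat => pvBit cm (j : Int)) := by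
        rw [List.range'_succ]; simp [hb]
      rw [if_pos hb]
      have hs : PySem.List.slice rest (some 2) none = rest.drop 2 :=
        PySem.List.slice_from_natCast rest 2
      rw [hs, ih (i + 1) (by omega) (rest.drop 2)]
      simp only [hcons, List.length_cons]
      set act' := (List.range' (i + 1) n).filter (fun j : Nat => pvBit cm (j : Int)) with hact'
      by_cases h2 : rest.length < 2
      · rw [if_pos h2, if_pos (by omega)]
      · rw [if_neg h2]
        by_cases h3 : (rest.drop 2).length < 2 * act'.length + 2
        · rw [if_pos h3, if_pos (by simp at h3; omega)]
        · rw [if_neg h3, if_neg (by simp at h3; omega)]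
          simp only [pvPairs]
          rw [pvGetD_drop, pvGetD_drop]
          have e1 : 2 + 2 * act'.length = 2 * (act'.length + 1) := by omega
          have e2 : 2 + (2 * act'.length + 1) = 2 * (act'.length + 1) + 1 := by omega
          rw [e1, e2]
    · have hcons : (List.range' i (n + 1)).filter (fun j : Nat => pvBit cm (j : Int))
          = (List.range' (i + 1) n).filter (fun j : Nat => pvBit cm (j : Int)) := by
        rw [List.range'_succ]; simp [hb]
      rw [if_neg hb]
      simp only [hcons]
      exact ih (i + 1) (by omega) rest

-- B's pair list equals A's pvGo once every consumed byte is in range of the buffer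
lemma pvPairs_eq_go (data : List Int) : ∀ (act : List Nat) (s : Nat),
    2 + 2 * s + 2 * act.length ≤ data.length →
    pvPairs (data.drop (2 + 2 * s)) act
      = pvGo data (act.map (fun j : Nat => (j : Int))) ((2 + 2 * s : Nat) : Int) := by
  intro act
  induction act with
  | nil => intro s _; rfl
  | cons j t ih =>
    intro s h
    simp only [pvPairs, List.map_cons, pvGo]
    rw [pvFb_two data (2 + 2 * s) (by simp at h; omega)]
    have hd : (data.drop (2 + 2 * s)).drop 2 = data.drop (2 + 2 * (s + 1)) := by
      rw [List.drop_drop]; congr 1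
    have hc : ((2 + 2 * s : Nat) : Int) + 2 = ((2 + 2 * (s + 1) : Nat) : Int) := by
      push_cast; ring
    rw [hd, hc, ih (s + 1) (by simp at h; omega)]
    simp

-- the Int channel list A filters is the cast of the Nat channel list B recurses over
lemma pvAct_cast (cm : Int) :
    (PySem.List.pyRange 0 8 1).filter (pvBit cm)
      = ((List.range' 0 8).filter (fun j : Nat => pvBit cm (j : Int))).map
          (fun j : Nat => (j : Int)) := by
  have h : PySem.List.pyRange 0 8 1 = (List.range' 0 8).map (fun j : Nat => (j : Int)) := by
    rw [pvRange8]; decide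
  rw [h, List.filter_map]
  rfl

-- ===== VERDICT (by name: the statement is the Claim_ definition above) =====
theorem decode_adc_frame_spec : Claim_equal_decode_adc_frame := by
  intro data _hdom hpre
  obtain ⟨hlen2, hrest⟩ := hpre
  match data, hlen2 with
  | a :: cm :: rest0, _ =>
  have hget : PySem.List.pyGet? (a :: cm :: rest0) 1 = some cm := by
    simp
  have hcmD : (a :: cm :: rest0).getD 1 0 = cm := rfl
  rw [hcmD] at hrest
  unfold Spec_decode_adc_frame decode_adc_frame decode_adc_frame_alt
  rw [hget]
  dsimp only
  set D := a :: cm :: rest0 with hD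
  have hsl : PySem.List.slice D (some 2) none = D.drop 2 := PySem.List.slice_from_natCast D 2
  have hwalk := pvWalk_eq cm 8 0 (by omega) (D.drop 2)
  simp only at hwalk
  set actN := (List.range' 0 8).filter (fun j : Nat => pvBit cm (j : Int)) with hactN
  set N := actN.length with hN
  have hcast : (PySem.List.pyRange 0 8 1).filter (pvBit cm)
      = actN.map (fun j : Nat => (j : Int)) := pvAct_cast cm
  have hNlow : pvLowCount cm = N := by
    rw [pvLowCount, hcast, List.length_map, hN]
  have hdlen : (D.drop 2).length = D.length - 2 := by simp
  rcases hrest with ⟨hcm0, hcm1, hbytes⟩ | hshort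
  case inr =>
    -- frame too short for either size accounting: both sides return None
    rw [hNlow] at hshort
    rw [Nat.cast_min] at hshort
    rw [if_pos (show ((D.length : Int)) < 1 + 1 + pv_count_bits cm * 2 + 2 by
          unfold pv_count_bits; omega)]
    have h2 : 2 ≤ D.length := by rw [hD]; simp
    rw [hsl, hwalk, if_pos (by rw [hdlen]; omega)]
  case inl =>
  have hcnt : pv_count_bits cm = (N : Int) := by
    rw [pvCount_eq cm hcm0 hcm1]
    rw [show (fun i => pvBit cm i) = pvBit cm from rfl, hcast, List.length_map, hN]
  rw [hsl, hwalk]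
  by_cases hg : D.length < 2 * N + 4
  · rw [if_pos (by rw [hcnt]; omega), if_pos (by rw [hdlen]; omega)]
  · rw [if_neg (by rw [hcnt]; omega), if_neg (by rw [hdlen]; omega)]
    have hlen : 2 + 2 * N + 2 ≤ D.length := by omega
    have hloop := pvLoopA D cm (PySem.List.pyRange 0 8 1) [] 2
    rw [hloop]
    rw [hcast, List.length_map, ← hN]
    have hpairs := pvPairs_eq_go D actN 0 (by omega)
    norm_num at hpairs
    refine congrArg some ?_
    refine Prod.ext ?_ (Prod.ext ?_ ?_)
    · -- the (channel, word) lists agree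
      dsimp only
      rw [List.nil_append]
      exact hpairs.symm
    · -- the timestamps agree
      dsimp only
      have e : (2 : Int) + 2 * (N : Int) = ((2 + 2 * N : Nat) : Int) := by push_cast; ring
      rw [e, pvFb_two D (2 + 2 * N) (by omega)]
      rw [pvGetD_drop, pvGetD_drop]
      have e2 : 2 + (2 * N + 1) = 2 + 2 * N + 1 := by omega
      rw [e2]
    · -- the expected sizes agree
      dsimp only
      rw [hcnt, pvPairs_length, ← hN]
      push_cast
      ring
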